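-- pv_equiv track=rewrite | github.com/kuehlein/algos | leetcode/top-interview-questions/easy/strings/first_unique_character_in_a_string.py | buildBitVector
-- ===== SOURCE A (Python) =====
-- def buildBitVector(s: str) -> int:
--     '''
--     Iterate through input string `s` building two bit vectors along the way. If the corresponding bit in `vector1` is `1`, the char is seen once already. If the corresponding bit in `vector2` is `1`, the char has only been seen once. AND the two vectors together in the return value to create a vector of values that have only been seen once.
--     '''
--     vector1 = 0
--     vector2 = 67108863 # int('11111111111111111111111111', 2) - `1` for each letter of alphabet
--     for char in s:
--         mask = 1 << (ord(char) - 97)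
--         if vector1 & mask == 0:
--             vector1 ^= mask
--         elif vector2 ^ mask < vector2:
--             vector2 ^= mask
--     return vector1 & vector2
-- ===== SOURCE B (Python) =====
-- def buildBitVector(s: str) -> int:
--     # Count character frequencies in one pass, then emit one bit per distinct
--     # char that occurs exactly once (and fits in the 26-bit alphabet mask).
--     counts = {}
--     for ch in s:
--         counts[ch] = counts.get(ch, 0) + 1
--     result = 0
--     for ch, n in counts.items():
--         bit = 1 << (ord(ch) - 97)
--         if n == 1 and bit <= 67108863:
--             result |= bit
--     return result
-- ===== Notes on version B (the rewrite author's own statement) =====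
-- stated objective: simpler
-- what changed: Replaces A's single-pass dual-bit-vector XOR state machine with a two-pass count-then-emit: build a dict of char frequencies, then OR in the bit of each distinct char whose count is 1 and whose bit fits the 26-bit mask.
import Mathlib
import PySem

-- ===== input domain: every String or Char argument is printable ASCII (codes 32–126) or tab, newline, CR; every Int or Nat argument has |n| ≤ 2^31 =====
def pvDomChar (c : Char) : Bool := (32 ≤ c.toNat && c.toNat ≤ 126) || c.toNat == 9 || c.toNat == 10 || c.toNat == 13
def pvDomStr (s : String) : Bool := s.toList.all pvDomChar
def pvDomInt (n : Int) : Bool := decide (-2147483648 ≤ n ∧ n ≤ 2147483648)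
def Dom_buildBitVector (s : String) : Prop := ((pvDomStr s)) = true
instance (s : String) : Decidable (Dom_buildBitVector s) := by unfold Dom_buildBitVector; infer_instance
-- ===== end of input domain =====

-- B replaces A's single-pass dual-bit-vector XOR state machine with a two-pass
-- count-then-emit over a frequency dict (objective: simpler); both raise on chars with code below 97 (excluded by Pre_).


-- ===== PORT A =====
-- loop body of A's `for char in s`
def stepA (v : Int × Int) (char : Char) : Int × Int :=
  -- mask = 1 << (ord(char) - 97): exact for ord(char) ≥ 97 (Pre_); Python raises ValueError below 97
  let mask : Int := (1 : Int) <<< (char.toNat - 97)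
  if PySem.Int.band v.1 mask = 0 then (PySem.Int.bxor v.1 mask, v.2)
  else if PySem.Int.bxor v.2 mask < v.2 then (v.1, PySem.Int.bxor v.2 mask)
  else v

def buildBitVector (s : String) : Int :=
  let st := s.toList.foldl stepA ((0 : Int), (67108863 : Int))
  PySem.Int.band st.1 st.2

-- ===== PORT B =====
-- loop body of B's `for ch, n in counts.items()`
def stepB (result : Int) (cn : Char × Int) : Int :=
  -- bit = 1 << (ord(ch) - 97): exact for ord(ch) ≥ 97 (Pre_); Python raises ValueError below 97
  let bit : Int := (1 : Int) <<< (cn.1.toNat - 97)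
  if cn.2 = 1 ∧ bit ≤ 67108863 then PySem.Int.bor result bit else result

def buildBitVector_alt (s : String) : Int :=
  let counts : PySem.Dict Char Int :=
    s.toList.foldl (fun d ch => d.insert ch (d.getD ch 0 + 1)) PySem.Dict.empty
  counts.items.foldl stepB 0

-- ===== PRECONDITION & SPEC =====
-- Pre_ excludes exactly the strings containing a character with code < 97:
-- there Python A (and B alike) raises ValueError on `1 << negative`.
def Pre_buildBitVector (s : String) : Prop := s.toList.all (fun c => 97 ≤ c.toNat) = true
instance (s : String) : Decidable (Pre_buildBitVector s) := by unfold Pre_buildBitVector; infer_instance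

def pvWitness_buildBitVector : String := "leetcode{}"

def Spec_buildBitVector (s : String) (out : Int) : Prop := out = buildBitVector_alt s
instance (s : String) (out : Int) : Decidable (Spec_buildBitVector s out) := by unfold Spec_buildBitVector; infer_instance

-- ===== CLAIM (what is proved, stated in full; the proofs are below) =====
def Claim_equal_buildBitVector : Prop := ∀ (s : String), Dom_buildBitVector s → Pre_buildBitVector s → Spec_buildBitVector s (buildBitVector s)

-- ===== LEMMAS AND PROOFS =====

theorem xor_two_pow_eq (p : Nat) : ∀ b : Nat, b ^^^ 2 ^ p = if b.testBit p then b - 2 ^ p else b + 2 ^ p := by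
  induction p with
  | zero =>
    intro b
    have hb : Nat.bit (b.testBit 0) (b >>> 1) = b := Nat.bit_testBit_zero_shiftRight_one b
    rw [← hb]
    have h1 : (2 : Nat) ^ 0 = Nat.bit true 0 := rfl
    rw [h1, Nat.xor_bit]
    rcases h : b.testBit 0 <;> simp [Nat.bit]
  | succ p ih =>
    intro b
    have hb : Nat.bit (b.testBit 0) (b >>> 1) = b := Nat.bit_testBit_zero_shiftRight_one b
    rw [← hb]
    have h2 : (2 : Nat) ^ (p + 1) = Nat.bit false (2 ^ p) := by simp [Nat.bit]; ring
    rw [h2, Nat.xor_bit, Nat.testBit_bit_succ, ih]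
    rcases h : (b >>> 1).testBit p
    · rcases hx : b.testBit 0 <;> simp [Nat.bit] <;> ring_nf
    · have hge : 2 ^ p ≤ b >>> 1 := Nat.ge_two_pow_of_testBit h
      rcases hx : b.testBit 0 <;> simp [Nat.bit] <;> omega

theorem xor_two_pow_lt_iff (b p : Nat) : b ^^^ 2 ^ p < b ↔ b.testBit p = true := by
  rw [xor_two_pow_eq]
  rcases h : b.testBit p
  · simp
  · have := Nat.ge_two_pow_of_testBit h
    have := Nat.two_pow_pos p
    simp; omega

theorem one_shiftLeft_int (p : Nat) : (1 : Int) <<< p = ((2 ^ p : Nat) : Int) := by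
  simp [Int.shiftLeft_eq]

theorem land_two_pow_eq_zero_iff (n i : Nat) : n &&& 2 ^ i = 0 ↔ n.testBit i = false := by
  rw [Nat.and_two_pow]
  rcases h : n.testBit i <;> simp

theorem char_eq_iff_toNat (c d : Char) : c = d ↔ c.toNat = d.toNat := by
  constructor
  · rintro rfl; rfl
  · intro h; exact Char.ext (UInt32.toNat_inj.mp h)

theorem toNat_ofNat_small (j : Nat) (h : j < 30) : (Char.ofNat (j + 97)).toNat = j + 97 := by
  rw [Char.toNat_ofNat]; rw [if_pos]; left; omega

-- invariant of A's loop: vector1 holds the seen chars, vector2 keeps an alphabet bit until a second occurrence clears it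
theorem foldA_spec (l : List Char) (hl : ∀ c ∈ l, 97 ≤ c.toNat ∧ c.toNat ≤ 126) :
    ∃ a b : Nat, l.foldl stepA ((0 : Int), (67108863 : Int)) = ((a : Int), (b : Int)) ∧
      (∀ j, a.testBit j = decide (j < 30 ∧ 0 < l.count (Char.ofNat (j + 97)))) ∧
      (∀ j, b.testBit j = decide (j < 26 ∧ l.count (Char.ofNat (j + 97)) ≤ 1)) := by
  induction l using List.reverseRecOn with
  | nil =>
    refine ⟨0, 67108863, by norm_num, ?_, ?_⟩
    · intro j; simp
    · intro j
      have h : (67108863 : Nat) = 2 ^ 26 - 1 := by norm_num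
      rw [h, Nat.testBit_two_pow_sub_one]
      simp
  | append_singleton l c ih =>
    have hc : 97 ≤ c.toNat ∧ c.toNat ≤ 126 := hl c (by simp)
    obtain ⟨a, b, hfold, ha, hb⟩ := ih (fun x hx => hl x (by simp [hx]))
    set p : Nat := c.toNat - 97 with hp
    have hp29 : p ≤ 29 := by omega
    have hcp : Char.ofNat (p + 97) = c := by
      rw [char_eq_iff_toNat, toNat_ofNat_small p (by omega)]; omega
    have hcnt : ∀ j, j ≠ p → (l ++ [c]).count (Char.ofNat (j + 97)) = l.count (Char.ofNat (j + 97)) := by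
      intro j hjp
      rw [List.count_append, List.count_singleton]
      by_cases hj : j < 30
      · have hEq : Char.ofNat (j + 97) ≠ c := by
          intro hEq
          have := toNat_ofNat_small j hj
          rw [hEq] at this; omega
        simp [Ne.symm hEq]
      · have hEq : Char.ofNat (j + 97) ≠ c := by
          intro hEq
          have h1 : (Char.ofNat (j + 97)).toNat = c.toNat := by rw [hEq]
          have h2 : c.toNat ≤ 126 := hc.2
          have h3 : 97 ≤ c.toNat := hc.1
          rw [Char.toNat_ofNat] at h1
          split at h1 <;> omega
        simp [Ne.symm hEq]
    have hcntp : (l ++ [c]).count c = l.count c + 1 := by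
      rw [List.count_append, List.count_singleton]; simp
    rw [List.foldl_append, hfold, List.foldl_cons, List.foldl_nil]
    rw [show stepA ((a : Int), (b : Int)) c =
        (if PySem.Int.band (a : Int) ((1 : Int) <<< p) = 0 then
          ((PySem.Int.bxor (a : Int) ((1 : Int) <<< p)), (b : Int))
        else if PySem.Int.bxor (b : Int) ((1 : Int) <<< p) < (b : Int) then
          ((a : Int), PySem.Int.bxor (b : Int) ((1 : Int) <<< p))
        else ((a : Int), (b : Int))) from rfl]
    rw [one_shiftLeft_int]
    have hap : a.testBit p = decide (p < 30 ∧ 0 < l.count c) := by rw [ha p, hcp]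
    have hbp : b.testBit p = decide (p < 26 ∧ l.count c ≤ 1) := by rw [hb p, hcp]
    by_cases h1 : a.testBit p = false
    · -- first occurrence of c
      have hcount0 : l.count c = 0 := by
        rw [hap] at h1
        have := of_decide_eq_false h1
        by_contra hpos
        exact this ⟨by omega, Nat.pos_of_ne_zero hpos⟩
      rw [if_pos (by simp only [PySem.Int.band_natCast, Int.natCast_eq_zero]; rw [land_two_pow_eq_zero_iff]; exact h1)]
      refine ⟨a ^^^ 2 ^ p, b, by simp only [PySem.Int.bxor_natCast], ?_, ?_⟩
      · intro j
        rw [Nat.testBit_xor, ha j, Nat.testBit_two_pow]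
        by_cases hjp : j = p
        · subst hjp
          rw [hcp, hcntp, hcount0]
          simp; omega
        · rw [hcnt j hjp]
          simp [Ne.symm hjp]
      · intro j
        rw [hb j]
        by_cases hjp : j = p
        · subst hjp
          rw [hcp, hcntp, hcount0]
          norm_num
        · rw [hcnt j hjp]
    · -- repeated occurrence
      rw [Bool.not_eq_false] at h1
      have hcountpos : 0 < l.count c := by
        rw [hap] at h1
        exact (of_decide_eq_true h1).2
      rw [if_neg (by simp only [PySem.Int.band_natCast, Int.natCast_eq_zero, land_two_pow_eq_zero_iff]; simp [h1])]
      have hAside : ∀ j, a.testBit j = decide (j < 30 ∧ 0 < (l ++ [c]).count (Char.ofNat (j + 97))) := by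
        intro j
        rw [ha j]
        by_cases hjp : j = p
        · subst hjp
          rw [hcp, hcntp]
          simp [hcountpos]
        · rw [hcnt j hjp]
      by_cases h2 : b.testBit p = true
      · -- second occurrence of an alphabet char: clear it in vector2
        have hcount1 : l.count c = 1 ∧ p < 26 := by
          rw [hbp] at h2
          have := of_decide_eq_true h2
          omega
        rw [if_pos (by simp only [PySem.Int.bxor_natCast]; exact_mod_cast (xor_two_pow_lt_iff b p).mpr h2)]
        refine ⟨a, b ^^^ 2 ^ p, by simp only [PySem.Int.bxor_natCast], hAside, ?_⟩
        intro j
        rw [Nat.testBit_xor, hb j, Nat.testBit_two_pow]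
        by_cases hjp : j = p
        · subst hjp
          rw [hcp, hcntp, hcount1.1]
          simp [hcount1.2]
        · rw [hcnt j hjp]
          simp [Ne.symm hjp]
      · -- already cleared (or outside the alphabet): no change
        rw [Bool.not_eq_true] at h2
        rw [if_neg (by simp only [PySem.Int.bxor_natCast]; rw [Int.ofNat_lt]; simp [xor_two_pow_lt_iff, h2])]
        refine ⟨a, b, rfl, hAside, ?_⟩
        intro j
        rw [hb j]
        by_cases hjp : j = p
        · subst hjp
          rw [hcp, hcntp]
          have hge2 : ¬ (p < 26 ∧ l.count c ≤ 1) := by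
            rw [hbp] at h2
            exact of_decide_eq_false h2
          have : ¬ (p < 26 ∧ l.count c + 1 ≤ 1) := by omega
          simp only [decide_eq_decide]
          constructor
          · intro h; exact absurd h hge2
          · intro h; exact absurd h this
        · rw [hcnt j hjp]

-- B's emit loop: OR of the bits of the exactly-once alphabet chars
theorem foldB_spec (L : List (Char × Int)) (hL : ∀ cn ∈ L, 97 ≤ cn.1.toNat) :
    ∀ r : Nat, ∃ out : Nat, L.foldl stepB ((r : Nat) : Int) = ((out : Nat) : Int) ∧
      ∀ j, out.testBit j =
        (r.testBit j || L.any (fun cn => decide (cn.2 = 1) && decide (cn.1.toNat = j + 97) && decide (j < 26))) := by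
  induction L with
  | nil => intro r; exact ⟨r, rfl, by simp⟩
  | cons cn L ih =>
    intro r
    have hc : 97 ≤ cn.1.toNat := hL cn (by simp)
    set p : Nat := cn.1.toNat - 97 with hp
    have hL' : ∀ x ∈ L, 97 ≤ x.1.toNat := fun x hx => hL x (by simp [hx])
    rw [List.foldl_cons]
    rw [show stepB ((r : Nat) : Int) cn =
        (if cn.2 = 1 ∧ (1 : Int) <<< p ≤ 67108863 then
          PySem.Int.bor ((r : Nat) : Int) ((1 : Int) <<< p)
        else ((r : Nat) : Int)) from rfl]
    rw [one_shiftLeft_int]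
    by_cases hcond : cn.2 = 1 ∧ p < 26
    · have hle : ((2 ^ p : Nat) : Int) ≤ 67108863 := by
        have : (2 : Nat) ^ p ≤ 2 ^ 25 := Nat.pow_le_pow_right (by norm_num) (by omega)
        have h2 : (2 : Nat) ^ 25 ≤ 67108863 := by norm_num
        exact_mod_cast le_trans this h2
      rw [if_pos ⟨hcond.1, hle⟩]
      rw [show PySem.Int.bor ((r : Nat) : Int) ((2 ^ p : Nat) : Int) = (((r ||| 2 ^ p : Nat)) : Int) from by simp only [PySem.Int.bor_natCast]]
      obtain ⟨out, hfold, hbit⟩ := ih hL' (r ||| 2 ^ p)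
      refine ⟨out, hfold, ?_⟩
      intro j
      rw [hbit j, Nat.testBit_or, Nat.testBit_two_pow, List.any_cons]
      by_cases hjp : p = j
      · subst hjp
        have : cn.1.toNat = p + 97 := by omega
        simp [hcond.1, hcond.2, this]
      · have : cn.1.toNat ≠ j + 97 := by omega
        simp [hjp, this]
    · have hnot : ¬ (cn.2 = 1 ∧ ((2 ^ p : Nat) : Int) ≤ 67108863) := by
        intro ⟨hn, hle⟩
        apply hcond
        refine ⟨hn, ?_⟩
        have : (2 : Nat) ^ p ≤ 67108863 := by exact_mod_cast hle
        by_contra hge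
        have : (2 : Nat) ^ 26 ≤ 2 ^ p := Nat.pow_le_pow_right (by norm_num) (by omega)
        omega
      rw [if_neg hnot]
      obtain ⟨out, hfold, hbit⟩ := ih hL' r
      refine ⟨out, hfold, ?_⟩
      intro j
      rw [hbit j, List.any_cons]
      by_cases hn1 : cn.2 = 1
      · have hj26 : ¬ (cn.1.toNat = j + 97 ∧ j < 26) := by
          intro ⟨hEq, hj⟩
          exact hcond ⟨hn1, by omega⟩
        by_cases hEq : cn.1.toNat = j + 97
        · have : ¬ (j < 26) := fun h => hj26 ⟨hEq, h⟩
          simp [hn1, hEq, this]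
        · simp [hEq]
      · simp [hn1]

-- ===== VERDICT (by name: the statement is the Claim_ definition above) =====
theorem buildBitVector_spec : Claim_equal_buildBitVector := by
  intro s hdom hpre
  unfold Spec_buildBitVector
  set l := s.toList with hl
  have hdom' : ∀ c ∈ l, 97 ≤ c.toNat ∧ c.toNat ≤ 126 := by
    intro c hc
    have h1 : 97 ≤ c.toNat := by
      have := List.all_eq_true.mp hpre c hc
      exact of_decide_eq_true this
    have h2 : pvDomChar c = true := by
      have := hdom
      unfold Dom_buildBitVector pvDomStr at this
      exact List.all_eq_true.mp this c hc
    simp only [pvDomChar, Bool.or_eq_true, Bool.and_eq_true, decide_eq_true_eq, beq_iff_eq] at h2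
    refine ⟨h1, ?_⟩
    rcases h2 with ((⟨h2a, h2b⟩ | h9) | h10) | h13 <;> omega
  obtain ⟨a, b, hfold, ha, hb⟩ := foldA_spec l hdom'
  -- reduce A
  unfold buildBitVector
  rw [← hl, hfold]
  rw [show PySem.Int.band ((a : Nat) : Int) ((b : Nat) : Int) = (((a &&& b : Nat)) : Int) from by simp only [PySem.Int.band_natCast]]
  -- reduce B
  unfold buildBitVector_alt
  rw [← hl]
  rw [PySem.Dict.foldl_insert_getD_add_one_eq_counter]
  show ((a &&& b : Nat) : Int) = List.foldl stepB 0 (PySem.Dict.counter l).items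
  rw [PySem.Dict.items_counter]
  set L : List (Char × Int) := (PySem.Set.ofList l).map (fun k => (k, (l.count k : Int))) with hLdef
  have hL : ∀ cn ∈ L, 97 ≤ cn.1.toNat := by
    intro cn hcn
    rw [hLdef] at hcn
    obtain ⟨k, hk, rfl⟩ := List.mem_map.mp hcn
    exact (hdom' k ((PySem.Set.mem_ofList l k).mp hk)).1
  obtain ⟨out, hfoldB, hbit⟩ := foldB_spec L hL 0
  rw [show ((0 : Nat) : Int) = (0 : Int) from rfl] at hfoldB
  rw [hfoldB]
  congr 1
  apply Nat.eq_of_testBit_eq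
  intro j
  rw [Nat.testBit_and, ha j, hb j, hbit j, Nat.zero_testBit]
  rw [Bool.false_or, hLdef, List.any_map]
  simp only [Function.comp_def]
  by_cases hA : j < 26 ∧ l.count (Char.ofNat (j + 97)) = 1
  · have hj30 : j < 30 := by omega
    have hmem : Char.ofNat (j + 97) ∈ l := by
      rw [← List.count_pos_iff]; omega
    have : (PySem.Set.ofList l).any
        (fun k => decide ((l.count k : Int) = 1) && decide (k.toNat = j + 97) && decide (j < 26)) = true := by
      rw [List.any_eq_true]
      refine ⟨Char.ofNat (j + 97), (PySem.Set.mem_ofList l _).mpr hmem, ?_⟩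
      simp [toNat_ofNat_small j hj30, hA.1]
      exact_mod_cast congrArg (Nat.cast : Nat → Int) hA.2
    rw [this]
    simp [hA.1, hA.2]; omega
  · have hnone : (PySem.Set.ofList l).any
        (fun k => decide ((l.count k : Int) = 1) && decide (k.toNat = j + 97) && decide (j < 26)) = false := by
      rw [Bool.eq_false_iff]
      intro hany
      obtain ⟨k, hk, hkprop⟩ := List.any_eq_true.mp hany
      simp only [Bool.and_eq_true, decide_eq_true_eq] at hkprop
      obtain ⟨⟨hcnt1, hkEq⟩, hj26⟩ := hkprop
      have hkx : k = Char.ofNat (j + 97) := by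
        rw [char_eq_iff_toNat, toNat_ofNat_small j (by omega), hkEq]
      rw [hkx] at hcnt1
      have : l.count (Char.ofNat (j + 97)) = 1 := by exact_mod_cast hcnt1
      exact hA ⟨hj26, this⟩
    rw [hnone]
    by_cases hj : j < 26
    · have : ¬ (l.count (Char.ofNat (j + 97)) = 1) := fun h => hA ⟨hj, h⟩
      by_cases hz : l.count (Char.ofNat (j + 97)) = 0
      · simp [hz]
      · simp; omega
    · simp [hj]
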